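-- pv_equiv track=rewrite | github.com/KimJayhyun/coding-challenges | baekjoon/completed_solutions/4375/4375.py | solution
-- ===== SOURCE A (Python) =====
-- def solution(n):
--     """
--     함수는 정수 n을 받아서 n의 배수인 1로만 구성된 가장 작은 숫자를 계산합니다.
--     계산된 숫자의 자릿수를 반환합니다.
--     """
--     if n == 1:
--         return 1
--
--     target_num = 1
--
--     digit = 1
--     while True:
--         digit += 1
--         target_num = target_num * 10 + 1
--         if target_num % n == 0:
--             break
--
--     return digit
-- ===== SOURCE B (Python) =====
-- def solution(n):
--     """Digit count of the smallest repunit (all-1s number) that is a multiple of n,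
--     computed as the multiplicative order of 10 modulo 9*|n|: since the d-digit
--     repunit equals (10**d - 1) // 9, n divides it exactly when 10**d == 1 (mod 9n)."""
--     m = 9 * abs(n)
--     d = 1
--     p = 10 % m
--     while p != 1:
--         p = p * 10 % m
--         d += 1
--     return d
-- ===== Notes on version B (the rewrite author's own statement) =====
-- stated objective: alternative
-- what changed: B computes the multiplicative order of 10 modulo 9*|n| (iterating powers of 10 reduced mod 9|n| until reaching 1), using the identity that n divides the d-digit repunit iff 10^d = 1 (mod 9n), instead of A's search over growing big-integer repunits tested mod n.
-- intended difference: On n = -1 A returns 2 while B returns 1: the single-digit repunit 1 is already a multiple of -1, which A misses because its search starts at the two-digit repunit. — e.g. on solution(-1): A returns 2, B returns 1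
-- outside the precondition, e.g. on solution(0): A raises ZeroDivisionError, B raises ZeroDivisionError
import Mathlib
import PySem

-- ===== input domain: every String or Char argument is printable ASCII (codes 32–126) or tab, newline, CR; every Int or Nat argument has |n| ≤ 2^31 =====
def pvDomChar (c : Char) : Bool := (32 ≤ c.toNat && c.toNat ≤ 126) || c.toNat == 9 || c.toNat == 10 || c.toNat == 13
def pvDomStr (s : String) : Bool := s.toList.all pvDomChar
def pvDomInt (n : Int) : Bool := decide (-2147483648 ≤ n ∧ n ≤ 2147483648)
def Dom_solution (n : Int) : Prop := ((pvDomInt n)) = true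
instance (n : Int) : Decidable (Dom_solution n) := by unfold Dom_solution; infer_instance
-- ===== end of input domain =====

-- B computes the multiplicative order of 10 modulo 9|n| (n divides the d-digit repunit
-- iff 10^d ≡ 1 mod 9n) instead of A's search over growing big-integer repunits;
-- B also treats n = -1 correctly (see D_ below).

-- ===== PORT A =====
-- A's unbounded 'while True' loop, fueled for totality; the fuel n.natAbs + 2 is never
-- exhausted on Pre_ inputs (for gcd(n,10)=1 a repunit with at most |n|+1 digits is divisible by n).
def loopA (n : Int) : Nat → Int → Int → Int
  | 0, digit, _ => digit + 1   -- fuel exhausted (unreachable under Pre_solution)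
  | fuel + 1, digit, target =>
      let digit' := digit + 1
      let target' := target * 10 + 1
      if PySem.Int.mod target' n = 0 then digit' else loopA n fuel digit' target'

def solution (n : Int) : Int :=
  if n = 1 then 1 else loopA n (n.natAbs + 2) 1 1

-- ===== PORT B =====
-- B's 'while p != 1' loop over powers of 10 reduced mod m = 9*|n|, fueled for totality.
def loopB (m : Int) : Nat → Int → Int → Int
  | 0, d, _ => d   -- fuel exhausted (unreachable under Pre_solution)
  | fuel + 1, d, p =>
      if p = 1 then d
      else loopB m fuel (d + 1) (PySem.Int.mod (p * 10) m)

def solution_alt (n : Int) : Int :=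
  let m := 9 * |n|
  loopB m (n.natAbs + 3) 1 (PySem.Int.mod 10 m)

-- ===== PRECONDITION & SPEC =====
-- Pre_ excludes n = 0, where A raises ZeroDivisionError, and n with gcd(n,10) ≠ 1,
-- where no number made of 1s is divisible by n and A's while-loop never terminates.
def Pre_solution (n : Int) : Prop := n ≠ 0 ∧ Int.gcd n 10 = 1
instance (n : Int) : Decidable (Pre_solution n) := by unfold Pre_solution; infer_instance
def pvWitness_solution : Int := 7

-- On n = -1 A returns 2 while B returns 1: the single-digit repunit is already a multiple of -1,
-- which A misses because its search starts at the two-digit repunit.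
def D_solution (n : Int) : Prop := n = -1
instance (n : Int) : Decidable (D_solution n) := by unfold D_solution; infer_instance

def Spec_solution (n : Int) (out : Int) : Prop := ¬ D_solution n → out = solution_alt n
instance (n : Int) (out : Int) : Decidable (Spec_solution n out) := by unfold Spec_solution; infer_instance

def pvDiffWitness_solution : Int := -1
def pvDiffWitnessOut_solution : Int × Int := (2, 1)

-- ===== CLAIM (what is proved, stated in full; the proofs are below) =====
def Claim_unchanged_solution : Prop := ∀ (n : Int), Dom_solution n → Pre_solution n → Spec_solution n (solution n)
def Claim_changed_solution : Prop := Dom_solution (pvDiffWitness_solution) ∧ Pre_solution (pvDiffWitness_solution) ∧ D_solution (pvDiffWitness_solution) ∧ solution (pvDiffWitness_solution) = pvDiffWitnessOut_solution.1 ∧ solution_alt (pvDiffWitness_solution) = pvDiffWitnessOut_solution.2 ∧ pvDiffWitnessOut_solution.1 ≠ pvDiffWitnessOut_solution.2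
def Claim_exact_solution : Prop := ∀ (n : Int), Dom_solution n → Pre_solution n → D_solution n → solution n ≠ solution_alt n

-- ===== LEMMAS AND PROOFS =====


-- For a modulus m > 1, 'x % m == 1' is exactly 'm divides x - 1'.
theorem pv_mod_eq_one (x m : Int) (hm : 1 < m) :
    PySem.Int.mod x m = 1 ↔ m ∣ x - 1 := by
  rw [PySem.Int.mod_eq_emod_of_pos (by omega : (0:Int) < m)]
  have h1 : (1:Int) % m = 1 := Int.emod_eq_of_lt (by norm_num) hm
  constructor
  · intro h
    have hx : x % m = 1 % m := by rw [h, h1]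
    exact Int.dvd_of_emod_eq_zero (Int.emod_eq_emod_iff_emod_sub_eq_zero.mp hx)
  · intro h
    have : (x - 1) % m = 0 := Int.emod_eq_zero_of_dvd h
    have hx : x % m = 1 % m := Int.emod_eq_emod_iff_emod_sub_eq_zero.mpr this
    rw [hx, h1]

-- 9|n| is at least 18 once n is neither 0 nor ±1.
theorem pv_m_big (n : Int) (hn : n ≠ 0) (h1 : n ≠ 1) (hm1 : n ≠ -1) : 18 ≤ 9 * |n| := by
  rcases abs_cases n with ⟨h, _⟩ | ⟨h, _⟩ <;> omega

-- The loop conditions agree: n divides the next repunit 10*t+1 iff the next power of 10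
-- is ≡ 1 mod m = 9|n|, given the invariant that p ≡ 9*t+1 (mod m).
theorem pv_cond (n t p : Int) (hn : n ≠ 0) (h1 : n ≠ 1) (hm1 : n ≠ -1)
    (hinv : (9 * |n|) ∣ (9 * t + 1 - p)) :
    (PySem.Int.mod (t * 10 + 1) n = 0 ↔ PySem.Int.mod (p * 10) (9 * |n|) = 1) := by
  have hbig := pv_m_big n hn h1 hm1
  rw [PySem.Int.mod_eq_zero_iff_dvd, pv_mod_eq_one _ _ (by omega)]
  have h10 : (9 * |n|) ∣ 10 * (9 * t + 1 - p) := hinv.mul_left 10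
  constructor
  · intro h
    have h9 : 9 * |n| ∣ 9 * (t * 10 + 1) := mul_dvd_mul_left 9 ((abs_dvd n (t * 10 + 1)).mpr h)
    rw [show 9 * (t * 10 + 1) = 10 * (9 * t + 1 - p) + (p * 10 - 1) by ring] at h9
    exact (dvd_add_right h10).mp h9
  · intro h
    have h9 : 9 * |n| ∣ 9 * (t * 10 + 1) := by
      rw [show 9 * (t * 10 + 1) = 10 * (9 * t + 1 - p) + (p * 10 - 1) by ring]
      exact (dvd_add_right h10).mpr h
    exact (abs_dvd n (t * 10 + 1)).mp ((mul_dvd_mul_iff_left (by norm_num : (9:Int) ≠ 0)).mp h9)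

-- m divides a - (a % m) (division identity).
theorem pv_dvd_sub_mod (a m : Int) : m ∣ (a - PySem.Int.mod a m) := by
  have h := PySem.Int.floordiv_mul_add_mod a m
  exact ⟨PySem.Int.floordiv a m, by linarith⟩

-- Lockstep alignment of the two loops under the invariant p ≡ 9*t+1 (mod 9|n|).
theorem pv_loop_align (n : Int) (hn : n ≠ 0) (h1 : n ≠ 1) (hm1 : n ≠ -1) :
    ∀ (fuel : Nat) (d t p : Int), (9 * |n|) ∣ (9 * t + 1 - p) →
    loopA n fuel d t = loopB (9 * |n|) fuel (d + 1) (PySem.Int.mod (p * 10) (9 * |n|)) := by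
  intro fuel
  induction fuel with
  | zero => intro d t p _; simp [loopA, loopB]
  | succ f ih =>
    intro d t p hinv
    have hc := pv_cond n t p hn h1 hm1 hinv
    by_cases h : PySem.Int.mod (t * 10 + 1) n = 0
    · simp [loopA, loopB, h, hc.mp h]
    · have hq : PySem.Int.mod (p * 10) (9 * |n|) ≠ 1 := fun hq => h (hc.mpr hq)
      simp only [loopA, loopB, hq, if_false, if_neg h]
      rw [ih (d + 1) (t * 10 + 1) (PySem.Int.mod (p * 10) (9 * |n|))
        (by
          have h2 := pv_dvd_sub_mod (p * 10) (9 * |n|)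
          have := dvd_add (hinv.mul_left 10) h2
          rw [show 10 * (9 * t + 1 - p) + (p * 10 - PySem.Int.mod (p * 10) (9 * |n|))
              = 9 * (t * 10 + 1) + 1 - PySem.Int.mod (p * 10) (9 * |n|) by ring] at this
          exact this)]

-- ===== VERDICT (by name: the statement is the Claim_ definition above) =====
theorem solution_spec : Claim_unchanged_solution := by
  intro n _ hpre hD
  by_cases h1 : n = 1
  · subst h1; decide
  · obtain ⟨hn, _⟩ := hpre
    have hm1 : n ≠ -1 := hD
    have hbig := pv_m_big n hn h1 hm1
    show solution n = solution_alt n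
    rw [solution, if_neg h1, solution_alt]
    have hp10 : PySem.Int.mod 10 (9 * |n|) = 10 := by
      rw [PySem.Int.mod_eq_emod_of_pos (by omega : (0:Int) < 9 * |n|)]
      exact Int.emod_eq_of_lt (by norm_num) (by omega)
    simp only [loopB, hp10]
    rw [if_neg (by norm_num)]
    exact pv_loop_align n hn h1 hm1 (n.natAbs + 2) 1 1 10 (by norm_num)

theorem solution_changed : Claim_changed_solution := by unfold Claim_changed_solution; decide

theorem solution_tight : Claim_exact_solution := by
  intro n _ _ hD
  rw [show n = -1 from hD]
  decide
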